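-- pv_equiv track=rewrite | github.com/Witchtel01/engrproj2 | optimizer.py | get_loop_values
-- ===== SOURCE A (Python) =====
-- def get_loop_values(index):
--     """Given an index, returns the indicies of the nested loop
--
--     Args:
--         index (int): The index to back calculate
--
--     Returns:
--         list[int]: List of indices for each loop
--     """
--
--     # Lengths of each nested loop
--     lengths = [4, 4, 4, 4, 6, 6, 5, 4]
--     # List to store products
--     cumuProducts = [1] * len(lengths)
--     # Loop through and calculate the blocks to int division by
--     for i in range(len(lengths) - 2, -1, -1):
--         cumuProducts[i] = cumuProducts[i + 1] * lengths[i + 1]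
--
--     loop_values = [0] * len(lengths)
--
--     # Calculates the indicies, stores to loop_values
--     for i in range(len(lengths)):
--         loop_values[i] = index // cumuProducts[i]
--         index %= cumuProducts[i]
--
--     return loop_values
-- ===== SOURCE B (Python) =====
-- def get_loop_values(index):
--     """Given an index, returns the indicies of the nested loop
--
--     Decodes least-significant digit first with divmod; the leftover
--     quotient becomes the (unbounded) top digit. No products table.
--     """
--     lengths = [4, 4, 4, 4, 6, 6, 5, 4]
--     loop_values = [0] * len(lengths)
--     for i in range(len(lengths) - 1, 0, -1):
--         index, loop_values[i] = divmod(index, lengths[i])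
--     loop_values[0] = index
--     return loop_values
-- ===== Notes on version B (the rewrite author's own statement) =====
-- stated objective: simpler
-- what changed: Replaces the precomputed cumulative-products table and most-significant-first division by a single least-significant-first divmod loop keeping only a running quotient, with the leftover quotient as the unbounded top digit.
import Mathlib
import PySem

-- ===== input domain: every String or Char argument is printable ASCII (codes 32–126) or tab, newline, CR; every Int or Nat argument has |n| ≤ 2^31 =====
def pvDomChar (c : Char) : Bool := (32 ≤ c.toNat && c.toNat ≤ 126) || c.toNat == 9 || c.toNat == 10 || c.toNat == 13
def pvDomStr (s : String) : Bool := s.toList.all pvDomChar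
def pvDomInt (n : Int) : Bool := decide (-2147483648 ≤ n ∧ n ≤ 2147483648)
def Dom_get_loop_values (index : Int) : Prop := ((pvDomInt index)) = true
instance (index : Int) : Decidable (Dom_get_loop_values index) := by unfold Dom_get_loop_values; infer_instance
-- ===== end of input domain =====

-- B drops A's cumulative-products table: one divmod loop least-significant-first, leftover quotient is the top digit.

-- ===== PORT A =====
def get_loop_values (index : Int) : List Int :=
  let lengths : List Int := [4, 4, 4, 4, 6, 6, 5, 4]
  -- cumuProducts = [1] * 8; for i in range(6, -1, -1): cumuProducts[i] = cumuProducts[i+1] * lengths[i+1]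
  let cumuProducts : List Int :=
    (PySem.List.pyRange 6 (-1) (-1)).foldl
      (fun c i => c.set i.toNat (c.getD (i.toNat + 1) 0 * lengths.getD (i.toNat + 1) 0))
      (List.replicate 8 (1 : Int))
  -- loop_values = [0] * 8; for i in range(8): loop_values[i] = index // cumuProducts[i]; index %= cumuProducts[i]
  let st :=
    (PySem.List.pyRange 0 8 1).foldl
      (fun (st : Int × List Int) i =>
        let cp := cumuProducts.getD i.toNat 0
        (PySem.Int.mod st.1 cp, st.2.set i.toNat (PySem.Int.floordiv st.1 cp)))
      (index, List.replicate 8 (0 : Int))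
  st.2

-- ===== PORT B =====
def get_loop_values_alt (index : Int) : List Int :=
  let lengths : List Int := [4, 4, 4, 4, 6, 6, 5, 4]
  -- for i in range(7, 0, -1): index, loop_values[i] = divmod(index, lengths[i]); loop_values[0] = index
  let st :=
    (PySem.List.pyRange 7 0 (-1)).foldl
      (fun (st : Int × List Int) i =>
        let L := lengths.getD i.toNat 0
        (PySem.Int.floordiv st.1 L, st.2.set i.toNat (PySem.Int.mod st.1 L)))
      (index, List.replicate 8 (0 : Int))
  st.2.set 0 st.1

-- ===== PRECONDITION & SPEC =====
def Spec_get_loop_values (index : Int) (out : List Int) : Prop := out = get_loop_values_alt index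
instance (index : Int) (out : List Int) : Decidable (Spec_get_loop_values index out) := by unfold Spec_get_loop_values; infer_instance

-- ===== CLAIM (what is proved, stated in full; the proofs are below) =====
def Claim_equal_get_loop_values : Prop := ∀ (index : Int), Dom_get_loop_values index → Spec_get_loop_values index (get_loop_values index)

-- ===== LEMMAS AND PROOFS =====

-- ===== VERDICT (by name: the statement is the Claim_ definition above) =====
theorem get_loop_values_spec : Claim_equal_get_loop_values := by
  intro i _
  unfold Spec_get_loop_values
  have h6 : PySem.List.pyRange 6 (-1) (-1) = [6, 5, 4, 3, 2, 1, 0] := by decide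
  have h7 : PySem.List.pyRange 7 0 (-1) = [7, 6, 5, 4, 3, 2, 1] := by decide
  have h8 : PySem.List.pyRange 0 8 1 = [0, 1, 2, 3, 4, 5, 6, 7] := by decide
  simp only [get_loop_values, get_loop_values_alt, h6, h7, h8, List.foldl,
    List.replicate, List.set, List.getD, Int.toNat, List.getElem?_cons_zero,
    List.getElem?_cons_succ, Option.getD]
  norm_num [PySem.Int.floordiv, PySem.Int.mod]
  have fd : ∀ (a b : Int), 0 < b → a.fdiv b = a / b := fun a b h => by
    rw [Int.fdiv_eq_ediv]; simp [h.le]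
  have fm : ∀ (a b : Int), 0 < b → a.fmod b = a % b := fun a b h => by
    rw [Int.fmod_eq_emod]; simp [h.le]
  simp only [fd _ 4 (by norm_num), fd _ 5 (by norm_num), fd _ 6 (by norm_num),
    fd _ 46080 (by norm_num), fd _ 11520 (by norm_num), fd _ 2880 (by norm_num),
    fd _ 720 (by norm_num), fd _ 120 (by norm_num), fd _ 20 (by norm_num),
    fm _ 4 (by norm_num), fm _ 5 (by norm_num), fm _ 6 (by norm_num),
    fm _ 46080 (by norm_num), fm _ 11520 (by norm_num), fm _ 2880 (by norm_num),
    fm _ 720 (by norm_num), fm _ 120 (by norm_num), fm _ 20 (by norm_num)]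
  omega
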